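-- pv_equiv track=rewrite | github.com/edd19/linguisticsp2 | estimation_n_grams.py | split_sentence_n_grams
-- ===== SOURCE A (Python) =====
-- def split_sentence_n_grams(sentence, n):
--     words = sentence.split()
--     n_grams = []
--     for word in words:
--         n_grams.append(word)
--         if len(n_grams) >= n:
--             yield " ".join(n_grams)
--             n_grams.pop(0)
-- ===== SOURCE B (Python) =====
-- def split_sentence_n_grams(sentence, n):
--     words = sentence.split()
--     m = max(n, 1)
--     for i in range(len(words) - m + 1):
--         yield " ".join(words[i:i + m])
-- ===== Notes on version B (the rewrite author's own statement) =====
-- stated objective: idiomatic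
-- what changed: Replaces the rolling buffer with append/pop bookkeeping by direct index-based slicing over start positions (words[i:i+m]); max(n,1) expresses that A emits single words for non-positive n.
import Mathlib
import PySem

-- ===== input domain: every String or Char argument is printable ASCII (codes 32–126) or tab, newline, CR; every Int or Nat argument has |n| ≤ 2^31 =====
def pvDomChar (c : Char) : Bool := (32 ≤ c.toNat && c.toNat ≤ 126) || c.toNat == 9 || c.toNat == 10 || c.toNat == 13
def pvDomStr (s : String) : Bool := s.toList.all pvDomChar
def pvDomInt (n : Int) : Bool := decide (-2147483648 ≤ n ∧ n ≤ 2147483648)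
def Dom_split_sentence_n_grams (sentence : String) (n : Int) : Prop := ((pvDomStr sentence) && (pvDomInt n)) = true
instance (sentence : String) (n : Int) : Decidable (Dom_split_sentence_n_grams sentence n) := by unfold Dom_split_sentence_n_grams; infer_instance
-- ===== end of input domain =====

-- B replaces A's rolling buffer (append/pop bookkeeping) by direct index-based slicing over
-- start positions — a more idiomatic decomposition of the same sliding-window task.

-- ===== PORT A =====
def split_sentence_n_grams (sentence : String) (n : Int) : List String :=
  let words := PySem.Str.split₀ sentence
  (words.foldl (fun (st : List String × List String) word =>
      let buf := st.1 ++ [word]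
      if (buf.length : Int) ≥ n then (buf.tail, st.2 ++ [PySem.Str.join " " buf])
      else (buf, st.2)) ([], [])).2

-- ===== PORT B =====
def split_sentence_n_grams_alt (sentence : String) (n : Int) : List String :=
  let words := PySem.Str.split₀ sentence
  let m := max n 1
  (PySem.List.pyRange 0 ((words.length : Int) - m + 1) 1).map
    (fun i => PySem.Str.join " " (PySem.List.slice words (some i) (some (i + m))))

-- ===== PRECONDITION & SPEC =====
def Spec_split_sentence_n_grams (sentence : String) (n : Int) (out : List String) : Prop := out = split_sentence_n_grams_alt sentence n
instance (sentence : String) (n : Int) (out : List String) : Decidable (Spec_split_sentence_n_grams sentence n out) := by unfold Spec_split_sentence_n_grams; infer_instance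

-- ===== CLAIM (what is proved, stated in full; the proofs are below) =====
def Claim_equal_split_sentence_n_grams : Prop := ∀ (sentence : String) (n : Int), Dom_split_sentence_n_grams sentence n → Spec_split_sentence_n_grams sentence n (split_sentence_n_grams sentence n)

-- ===== LEMMAS AND PROOFS =====

-- A's loop from state (buf, out): out gains every window of buf ++ ws not already emitted.
theorem loopA_eq (n : Int) (m : Nat) (hm : m = (max n 1).toNat) :
    ∀ (ws buf out : List String), buf.length < m →
    (ws.foldl (fun (st : List String × List String) word =>
        let buf := st.1 ++ [word]
        if (buf.length : Int) ≥ n then (buf.tail, st.2 ++ [PySem.Str.join " " buf])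
        else (buf, st.2)) (buf, out)).2
    = out ++ (List.range (buf.length + ws.length + 1 - m)).map
        (fun j => PySem.Str.join " " (((buf ++ ws).drop j).take m)) := by
  intro ws
  induction ws with
  | nil =>
    intro buf out hbuf
    simp only [List.foldl_nil, List.length_nil]
    have : buf.length + 0 + 1 - m = 0 := by omega
    simp [this]
  | cons w ws ih =>
    intro buf out hbuf
    have hcond : ((((buf ++ [w]).length : Nat) : Int) ≥ n) ↔ ((max n 1).toNat ≤ (buf ++ [w]).length) := by
      simp only [List.length_append, List.length_cons, List.length_nil]
      omega
    simp only [List.foldl_cons]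
    by_cases hge : (((buf ++ [w]).length : Nat) : Int) ≥ n
    · -- yield case: buf ++ [w] has length m
      have hlen : (buf ++ [w]).length = m := by
        have := hcond.mp hge
        simp only [List.length_append, List.length_cons, List.length_nil] at this ⊢
        omega
      have hne : buf ++ [w] ≠ [] := by simp
      rw [if_pos hge]
      have htail : (buf ++ [w]).tail.length < m := by
        rw [List.length_tail, hlen]; omega
      rw [ih ((buf ++ [w]).tail) (out ++ [PySem.Str.join " " (buf ++ [w])]) htail]
      have hcount : (buf ++ [w]).tail.length + ws.length + 1 - m = ws.length := by
        rw [List.length_tail, hlen]; omega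
      have hcount2 : buf.length + (w :: ws).length + 1 - m = ws.length + 1 := by
        simp only [List.length_cons]
        simp only [List.length_append, List.length_cons, List.length_nil] at hlen
        omega
      rw [hcount, hcount2, List.range_succ_eq_map, List.map_cons, List.map_map]
      have hassoc : buf ++ w :: ws = (buf ++ [w]) ++ ws := by simp
      rw [hassoc]
      have h0 : ((buf ++ [w]) ++ ws).take m = buf ++ [w] := by
        rw [← hlen]; exact List.take_left
      obtain ⟨b0, bs, hb⟩ := List.exists_cons_of_ne_nil hne
      have hrest : ∀ j : Nat,
          (((buf ++ [w]) ++ ws).drop (j + 1)).take m = (((buf ++ [w]).tail ++ ws).drop j).take m := by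
        intro j
        rw [hb]
        simp [List.drop_succ_cons]
      rw [List.drop_zero, h0]
      have hmap : List.map (fun j => PySem.Str.join " " ((((buf ++ [w]).tail ++ ws).drop j).take m))
            (List.range ws.length)
          = List.map ((fun j => PySem.Str.join " " ((((buf ++ [w]) ++ ws).drop j).take m)) ∘ Nat.succ)
            (List.range ws.length) := by
        apply List.map_congr_left
        intro j _
        simp only [Function.comp_apply]
        rw [← hrest j]
      rw [hmap, List.append_assoc, List.singleton_append]
    · -- no yield: buffer keeps growing
      rw [if_neg hge]
      have hlt : (buf ++ [w]).length < m := by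
        have := (not_iff_not.mpr hcond).mp hge
        omega
      rw [ih (buf ++ [w]) out hlt]
      have : (buf ++ [w]).length + ws.length + 1 - m = buf.length + (w :: ws).length + 1 - m := by
        simp; omega
      rw [this]
      have hassoc : (buf ++ [w]) ++ ws = buf ++ w :: ws := by simp
      rw [hassoc]

-- B's range-and-slice map written with Nat indices.
theorem altB_eq (n : Int) (m : Nat) (hm : m = (max n 1).toNat) (ws : List String) :
    (PySem.List.pyRange 0 ((ws.length : Int) - max n 1 + 1) 1).map
      (fun i => PySem.Str.join " " (PySem.List.slice ws (some i) (some (i + max n 1))))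
    = (List.range (ws.length + 1 - m)).map
        (fun j => PySem.Str.join " " ((ws.drop j).take m)) := by
  have hmax : max n 1 = (m : Int) := by omega
  rw [PySem.List.pyRange_one, List.map_map]
  have hcnt : ((ws.length : Int) - max n 1 + 1 - 0).toNat = ws.length + 1 - m := by omega
  rw [hcnt]
  apply List.map_congr_left
  intro j _
  simp only [Function.comp_apply, hmax, zero_add]
  rw [PySem.List.slice_natCast_add]

-- ===== VERDICT (by name: the statement is the Claim_ definition above) =====
theorem split_sentence_n_grams_spec : Claim_equal_split_sentence_n_grams := by
  intro sentence n _
  unfold Spec_split_sentence_n_grams split_sentence_n_grams split_sentence_n_grams_alt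
  set ws := PySem.Str.split₀ sentence with hws
  set m := (max n 1).toNat with hm
  have hm1 : 0 < m := by omega
  rw [loopA_eq n m hm ws [] [] (by simpa using hm1), altB_eq n m hm ws]
  simp
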